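-- pv_equiv track=rewrite | github.com/PabloLimaDelgado/Programacion-1-UTN | Parcial 2/func/funcions.py | horizontal_gene_verification
-- ===== SOURCE A (Python) =====
-- def horizontal_gene_verification(adn):
--
--     counter_genes = 0
--     for adn_aux in adn:
--         counter = 0
--
--         for i in range(len(adn_aux) - 1): #ITERA LA MATRIZ POR FILAS Y REVISA CADA STRING
--             current_gene = adn_aux[i]
--             next_gene = adn_aux[i + 1]
--
--             if (current_gene == next_gene):
--                 counter += 1
--                 if (counter >= 3):  # VERIFICA SI HAY 4 GENES CONSECUTIVOS
--                     counter_genes += 1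
--             else:
--                 counter = 0
--
--     return counter_genes
-- ===== SOURCE B (Python) =====
-- def _run_lengths(row):
--     lengths = []
--     cur = ""
--     n = 0
--     for g in row:
--         if n > 0 and g == cur:
--             n += 1
--         else:
--             if n > 0:
--                 lengths.append(n)
--             cur = g
--             n = 1
--     if n > 0:
--         lengths.append(n)
--     return lengths
--
--
-- def horizontal_gene_verification(adn):
--     return sum(max(0, L - 3) for row in adn for L in _run_lengths(row))
-- ===== Notes on version B (the rewrite author's own statement) =====
-- stated objective: alternative
-- what changed: Replaces A's index-based loop with a stateful adjacent-pair counter by a run-length decomposition of each row into maximal runs of equal genes, summing the closed-form contribution max(0, L-3) per run.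
import Mathlib
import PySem

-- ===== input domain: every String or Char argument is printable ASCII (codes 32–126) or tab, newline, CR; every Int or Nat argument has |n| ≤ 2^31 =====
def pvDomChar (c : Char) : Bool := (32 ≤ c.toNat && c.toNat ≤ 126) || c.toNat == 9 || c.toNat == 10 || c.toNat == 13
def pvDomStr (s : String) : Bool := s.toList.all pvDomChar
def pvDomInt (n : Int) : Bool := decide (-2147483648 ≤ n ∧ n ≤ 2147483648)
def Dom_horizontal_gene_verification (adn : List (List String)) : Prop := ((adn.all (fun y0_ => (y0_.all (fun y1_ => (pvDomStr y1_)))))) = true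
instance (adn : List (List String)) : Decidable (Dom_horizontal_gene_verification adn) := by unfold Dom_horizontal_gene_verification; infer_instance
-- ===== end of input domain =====

-- B replaces A's stateful adjacent-pair counter with a run-length decomposition
-- (maximal runs of equal genes) and a per-run contribution max(0, L-3); alternative decomposition, same cost.


-- ===== PORT A =====
-- the body of A's inner loop: state (counter, counter_genes), current and next gene
def hgvStep (st : Int × Int) (current_gene next_gene : String) : Int × Int :=
  if current_gene == next_gene then
    let counter := st.1 + 1
    (counter, if counter ≥ 3 then st.2 + 1 else st.2)
  else (0, st.2)

def horizontal_gene_verification (adn : List (List String)) : Int :=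
  adn.foldl (fun counter_genes adn_aux =>
    ((PySem.List.pyRange 0 ((adn_aux.length : Int) - 1) 1).foldl
      (fun st i =>
        hgvStep st (PySem.List.pyGetD adn_aux i "") (PySem.List.pyGetD adn_aux (i + 1) ""))
      (0, counter_genes)).2) 0

-- ===== PORT B =====
-- one step of _run_lengths' loop: state (lengths, cur, n)
def rlStep (st : List Int × String × Int) (g : String) : List Int × String × Int :=
  if st.2.2 > 0 && g == st.2.1 then (st.1, st.2.1, st.2.2 + 1)
  else ((if st.2.2 > 0 then st.1 ++ [st.2.2] else st.1), g, 1)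

-- _run_lengths: the maximal-run lengths of a row (cur's initial value is unread while n = 0)
def runLengths (row : List String) : List Int :=
  let st := row.foldl rlStep ([], "", 0)
  if st.2.2 > 0 then st.1 ++ [st.2.2] else st.1

def horizontal_gene_verification_alt (adn : List (List String)) : Int :=
  (adn.map (fun row => ((runLengths row).map (fun L => max 0 (L - 3))).sum)).sum

-- ===== PRECONDITION & SPEC =====
def Spec_horizontal_gene_verification (adn : List (List String)) (out : Int) : Prop := out = horizontal_gene_verification_alt adn
instance (adn : List (List String)) (out : Int) : Decidable (Spec_horizontal_gene_verification adn out) := by unfold Spec_horizontal_gene_verification; infer_instance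

-- ===== CLAIM (what is proved, stated in full; the proofs are below) =====
def Claim_equal_horizontal_gene_verification : Prop := ∀ (adn : List (List String)), Dom_horizontal_gene_verification adn → Spec_horizontal_gene_verification adn (horizontal_gene_verification adn)

-- ===== LEMMAS AND PROOFS =====

-- structural form of A's inner loop: fold hgvStep over adjacent pairs
def pairsFold : List String → Int × Int → Int × Int
  | x :: y :: rest, acc => pairsFold (y :: rest) (hgvStep acc x y)
  | _, acc => acc

-- structural run-length recursion: current run has head x and length n so far
def rlGo : List String → String → Int → List Int
  | [], _, n => [n]
  | y :: ys, x, n => if x == y then rlGo ys x (n + 1) else n :: rlGo ys y 1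

def sC (l : List Int) : Int := (l.map (fun L => max 0 (L - 3))).sum

-- Lemma A: the indexed inner loop of A equals the structural pair fold
theorem idx_to_pairs (row : List String) (k : Nat) :
    ∀ (a : Nat), row.length - a ≤ k → ∀ (acc : Int × Int),
    (PySem.List.pyRange (a : Int) ((row.length : Int) - 1) 1).foldl
      (fun st i => hgvStep st (PySem.List.pyGetD row i "") (PySem.List.pyGetD row (i + 1) ""))
      acc
    = pairsFold (row.drop a) acc := by
  induction k with
  | zero =>
    intro a ha acc
    have h1 : (row.length : Int) - 1 ≤ (a : Int) := by omega
    rw [PySem.List.pyRange_one_eq_nil h1]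
    have h2 : row.drop a = [] := List.drop_eq_nil_of_le (by omega)
    simp [h2, pairsFold]
  | succ k ih =>
    intro a ha acc
    by_cases h : (row.length : Int) - 1 ≤ (a : Int)
    · rw [PySem.List.pyRange_one_eq_nil h]
      rcases hd : row.drop a with _ | ⟨x, rest⟩
      · simp [pairsFold]
      · have hlen : row.length - a = rest.length + 1 := by
          have h2 := congrArg List.length hd
          simpa using h2
        have : rest = [] := by
          have := List.length_eq_zero_iff.mp (by omega : rest.length = 0)
          exact this
        subst this
        simp [pairsFold]
    · have ha1 : a + 1 < row.length := by omega
      have ha0 : a < row.length := by omega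
      rw [PySem.List.pyRange_one_cons (by omega)]
      rw [List.foldl_cons]
      have e1 : PySem.List.pyGetD row (a : Int) "" = row[a] := by
        rw [PySem.List.pyGetD_natCast]; exact List.getD_eq_getElem _ _ ha0
      have e2 : PySem.List.pyGetD row ((a : Int) + 1) "" = row[a + 1] := by
        have : ((a : Int) + 1) = ((a + 1 : Nat) : Int) := by push_cast; ring
        rw [this, PySem.List.pyGetD_natCast]; exact List.getD_eq_getElem _ _ ha1
      rw [e1, e2]
      have : ((a : Int) + 1) = ((a + 1 : Nat) : Int) := by push_cast; ring
      rw [this, ih (a + 1) (by omega)]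
      have hd1 : row.drop a = row[a] :: row.drop (a + 1) := List.drop_eq_getElem_cons ha0
      have hd2 : row.drop (a + 1) = row[a + 1] :: row.drop (a + 2) := List.drop_eq_getElem_cons ha1
      rw [hd1, hd2, pairsFold, ← hd2]

-- Lemma C: the pair fold's count equals the per-run closed form over rlGo
theorem pairs_runs : ∀ (xs : List String) (x : String) (c t : Int), 0 ≤ c →
    (pairsFold (x :: xs) (c, t)).2 + max 0 (c + 1 - 3) = t + sC (rlGo xs x (c + 1)) := by
  intro xs
  induction xs with
  | nil => intro x c t hc; simp [pairsFold, rlGo, sC]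
  | cons y ys ih =>
    intro x c t hc
    by_cases hxy : x = y
    · subst hxy
      rw [show pairsFold (x :: x :: ys) (c, t) = pairsFold (x :: ys) (hgvStep (c, t) x x) from rfl]
      rw [show rlGo (x :: ys) x (c + 1) = rlGo ys x (c + 1 + 1) by simp [rlGo]]
      rw [show hgvStep (c, t) x x = (c + 1, if c + 1 ≥ 3 then t + 1 else t) by simp [hgvStep]]
      have := ih x (c + 1) (if c + 1 ≥ 3 then t + 1 else t) (by omega)
      split_ifs at this ⊢ <;> omega
    · have hxy' : (x == y) = false := by simp [hxy]
      rw [show pairsFold (x :: y :: ys) (c, t) = pairsFold (y :: ys) (hgvStep (c, t) x y) from rfl]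
      rw [show hgvStep (c, t) x y = (0, t) by simp [hgvStep, hxy']]
      rw [show rlGo (y :: ys) x (c + 1) = (c + 1) :: rlGo ys y 1 by simp [rlGo, hxy']]
      have hih := ih y 0 t (by omega)
      have h01 : (0 : Int) + 1 = 1 := by norm_num
      rw [h01] at hih
      simp only [sC, List.map_cons, List.sum_cons] at hih ⊢
      omega

-- Lemma D: the foldl form of _run_lengths equals rlGo once a run is open
theorem rl_fold_go : ∀ (xs : List String) (x : String) (n : Int) (lengths : List Int), 0 < n →
    (let st := xs.foldl rlStep (lengths, x, n);
     if st.2.2 > 0 then st.1 ++ [st.2.2] else st.1) = lengths ++ rlGo xs x n := by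
  intro xs
  induction xs with
  | nil => intro x n lengths hn; simp [rlGo, hn]
  | cons y ys ih =>
    intro x n lengths hn
    by_cases hxy : x = y
    · subst hxy
      rw [show (x :: ys).foldl rlStep (lengths, x, n) = ys.foldl rlStep (rlStep (lengths, x, n) x) from rfl]
      rw [show rlStep (lengths, x, n) x = (lengths, x, n + 1) by simp [rlStep, hn]]
      rw [show rlGo (x :: ys) x n = rlGo ys x (n + 1) by simp [rlGo]]
      exact ih x (n + 1) lengths (by omega)
    · have hxy' : (y == x) = false := by simp [Ne.symm hxy]
      rw [show (y :: ys).foldl rlStep (lengths, x, n) = ys.foldl rlStep (rlStep (lengths, x, n) y) from rfl]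
      rw [show rlStep (lengths, x, n) y = (lengths ++ [n], y, 1) by simp [rlStep, hxy', hn]]
      rw [show rlGo (y :: ys) x n = n :: rlGo ys y 1 by simp [rlGo, hxy, Ne.symm]]
      rw [ih y 1 (lengths ++ [n]) (by omega)]
      simp

theorem runLengths_eq : ∀ (row : List String), runLengths row = (match row with | [] => [] | x :: xs => rlGo xs x 1) := by
  intro row
  rcases row with _ | ⟨x, xs⟩
  · simp [runLengths]
  · show runLengths (x :: xs) = rlGo xs x 1
    unfold runLengths
    rw [show (x :: xs).foldl rlStep ([], "", 0) = xs.foldl rlStep (rlStep ([], "", 0) x) from rfl]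
    rw [show rlStep ([], "", (0 : Int)) x = ([], x, 1) by simp [rlStep]]
    have := rl_fold_go xs x 1 [] (by omega)
    simpa using this

-- Lemma E: A's whole per-row contribution
theorem row_eq (row : List String) (t : Int) :
    ((PySem.List.pyRange 0 ((row.length : Int) - 1) 1).foldl
      (fun st i => hgvStep st (PySem.List.pyGetD row i "") (PySem.List.pyGetD row (i + 1) ""))
      (0, t)).2 = t + sC (runLengths row) := by
  have h := idx_to_pairs row row.length 0 (by omega) (0, t)
  norm_num at h
  rw [h, runLengths_eq]
  rcases row with _ | ⟨x, xs⟩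
  · simp [pairsFold, sC]
  · have := pairs_runs xs x 0 t (by omega)
    simp at this ⊢
    omega

-- final fold lemma
theorem fold_sum (adn : List (List String)) : ∀ (t : Int),
    adn.foldl (fun counter_genes adn_aux =>
      ((PySem.List.pyRange 0 ((adn_aux.length : Int) - 1) 1).foldl
        (fun st i => hgvStep st (PySem.List.pyGetD adn_aux i "") (PySem.List.pyGetD adn_aux (i + 1) ""))
        (0, counter_genes)).2) t
    = t + (adn.map (fun row => sC (runLengths row))).sum := by
  induction adn with
  | nil => intro t; simp
  | cons row rest ih =>
    intro t
    rw [List.foldl_cons, row_eq row t, ih]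
    simp
    ring

-- ===== VERDICT (by name: the statement is the Claim_ definition above) =====
theorem horizontal_gene_verification_spec : Claim_equal_horizontal_gene_verification := by
  intro adn _
  unfold Spec_horizontal_gene_verification horizontal_gene_verification horizontal_gene_verification_alt
  rw [fold_sum adn 0]
  simp [sC]
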